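-- pv_equiv track=rewrite | github.com/kubabuda/lc.py | src/0953_verifying_an_alien_dictionary.py | isAlienSorted3
-- ===== SOURCE A (Python) =====
-- from typing import List
--
-- def isAlienSorted3(words: List[str], order: str) -> bool:
--     if not words or len(words) == 1: return True
--     c_order = { c:i for i,c in enumerate(order) } # a:0, b:1
--
--     for i in range(len(words) - 1):
--         prev, last = words[i], words[i + 1]
--
--         for i, c_prev, in enumerate(prev):
--             if i >= len(last):
--                 return False # 'foo','fo' case
--             c_next = last[i]
--             if c_next != c_prev:
--                 if c_order[c_prev] > c_order[c_next]:
--                     return False # 'foo', 'fox'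
--                 break
--
--     return True
-- ===== SOURCE B (Python) =====
-- def isAlienSorted3(words, order):
--     if not words or len(words) == 1:
--         return True
--     c_order = {c: i for i, c in enumerate(order)}
--     keys = [[c_order.get(c, -1) for c in w] for w in words]
--     return all(a <= b for a, b in zip(keys, keys[1:]))
-- ===== Notes on version B (the rewrite author's own statement) =====
-- stated objective: simpler
-- what changed: Replaces the manual nested character-by-character comparison loop with early returns by building a rank-key list per word once (unknown characters rank -1) and checking all adjacent key pairs with Python's native lexicographic list comparison.
import Mathlib
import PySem

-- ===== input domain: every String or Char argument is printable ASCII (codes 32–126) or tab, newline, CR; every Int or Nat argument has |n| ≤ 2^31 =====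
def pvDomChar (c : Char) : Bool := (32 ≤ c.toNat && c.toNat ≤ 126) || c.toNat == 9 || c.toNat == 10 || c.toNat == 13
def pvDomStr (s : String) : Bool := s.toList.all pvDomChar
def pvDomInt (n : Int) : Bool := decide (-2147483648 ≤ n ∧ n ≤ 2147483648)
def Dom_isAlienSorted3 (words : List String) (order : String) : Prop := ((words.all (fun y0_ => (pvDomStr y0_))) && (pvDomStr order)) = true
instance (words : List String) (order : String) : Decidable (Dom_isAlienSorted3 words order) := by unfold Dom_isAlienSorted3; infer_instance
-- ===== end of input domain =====

-- B replaces A's nested char-by-char loop with per-word rank keys compared by native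
-- lexicographic list order (objective: simpler).

-- ===== PORT A =====
-- c_order = { c:i for i,c in enumerate(order) }
def pvBuildOrder (order : List Char) : PySem.Dict Char Int :=
  (PySem.List.enumerate order).foldl (fun d p => d.insert p.2 p.1) PySem.Dict.empty

-- A's inner loop `for i, c_prev in enumerate(prev): if i >= len(last): return False;
-- c_next = last[i]; …` as the obvious structural recursion over both lists (the index i
-- walks prev and last in lockstep; i >= len(last) is exactly `last` exhausted).
-- `c_order[c_prev]` raises KeyError on a char missing from order; Pre_ excludes those
-- inputs, so the port reads the dict with default 0 there.
def pvAInner (d : PySem.Dict Char Int) : List Char → List Char → Bool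
  | [], _ => true
  | _ :: _, [] => false                               -- 'foo','fo' case
  | c :: ps, cn :: ls =>
    if cn ≠ c then
      -- return False if c_order[c_prev] > c_order[c_next], else break (pair accepted)
      !(d.getD c 0 > d.getD cn 0)
    else pvAInner d ps ls

-- A's outer loop over i in range(len(words)-1) comparing words[i], words[i+1],
-- returning False early: the obvious structural recursion over adjacent pairs.
def pvAOuter (d : PySem.Dict Char Int) : List (List Char) → Bool
  | [] => true
  | [_] => true
  | a :: b :: rest => if pvAInner d a b then pvAOuter d (b :: rest) else false

def isAlienSorted3 (words : List String) (order : String) : Bool :=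
  if words = [] ∨ words.length = 1 then true
  else
    let d := pvBuildOrder order.toList
    pvAOuter d (words.map String.toList)

-- ===== PORT B =====
-- Python's list <= (lexicographic; a prefix is <= its extension)
def pvLexLe : List Int → List Int → Bool
  | [], _ => true
  | _ :: _, [] => false
  | a :: as, b :: bs => if a < b then true else if b < a then false else pvLexLe as bs

-- c_order = { c:i for i,c in enumerate(order) }  (B's own copy of the dict comprehension)
def pvBuildOrderB (order : List Char) : PySem.Dict Char Int :=
  (PySem.List.enumerate order).foldl (fun d p => d.insert p.2 p.1) PySem.Dict.empty

def isAlienSorted3_alt (words : List String) (order : String) : Bool :=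
  if words = [] ∨ words.length = 1 then true
  else
    let d := pvBuildOrderB order.toList
    let keys := words.map (fun w => w.toList.map (fun c => d.getD c (-1)))
    ((keys.zip (keys.drop 1)).all (fun p => pvLexLe p.1 p.2))

-- ===== PRECONDITION & SPEC =====
-- Index of the LAST occurrence of c in l (the dict comprehension overwrites duplicates).
def pvLastIdx (c : Char) : List Char → Option Nat
  | [] => none
  | x :: xs =>
    match pvLastIdx c xs with
    | some i => some (i + 1)
    | none => if x = c then some 0 else none

-- The pair of characters at the first position where two words differ (none if one is a
-- prefix of the other).
def pvFirstDiff (p l : List Char) : Option (Char × Char) :=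
  ((p.zip l).dropWhile (fun q => q.1 = q.2)).head?

-- A pair of adjacent words is ACCEPTED (A's scan moves on to the next pair): the first
-- word is a prefix of the second, or both characters at their first differing position
-- occur in `order` with the first's rank not greater.
def pvPairAccept (order : List Char) (p l : List Char) : Bool :=
  match pvFirstDiff p l with
  | some (c, c') =>
    match pvLastIdx c order, pvLastIdx c' order with
    | some i, some j => decide (i ≤ j)
    | _, _ => false
  | none => decide (p.length ≤ l.length)

-- A pair RAISES: a character at its first differing position is not in `order`.
def pvPairRaise (order : List Char) (p l : List Char) : Bool :=
  match pvFirstDiff p l with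
  | some (c, c') => (pvLastIdx c order).isNone || (pvLastIdx c' order).isNone
  | none => false

-- Pre_ excludes exactly the inputs on which A raises KeyError: those whose adjacent-pair
-- list has a raising pair preceded only by accepted pairs (there A's scan reaches the
-- missing-character lookup); on every other input A returns a Bool.
def Pre_isAlienSorted3 (words : List String) (order : String) : Prop :=
  ∀ k < ((words.map String.toList).zip ((words.map String.toList).drop 1)).length,
    ((((words.map String.toList).zip ((words.map String.toList).drop 1)).take k).all
        (fun p => pvPairAccept order.toList p.1 p.2)) = true →
    (pvPairRaise order.toList
      (((words.map String.toList).zip ((words.map String.toList).drop 1)).getD k ([], [])).1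
      (((words.map String.toList).zip ((words.map String.toList).drop 1)).getD k ([], [])).2) = false
instance (words : List String) (order : String) : Decidable (Pre_isAlienSorted3 words order) := by
  unfold Pre_isAlienSorted3; infer_instance

def pvWitness_isAlienSorted3 : List String × String := (["ab", "ad", "b"], "abcd")

def Spec_isAlienSorted3 (words : List String) (order : String) (out : Bool) : Prop := out = isAlienSorted3_alt words order
instance (words : List String) (order : String) (out : Bool) : Decidable (Spec_isAlienSorted3 words order out) := by unfold Spec_isAlienSorted3; infer_instance

-- ===== CLAIM (what is proved, stated in full; the proofs are below) =====
def Claim_equal_isAlienSorted3 : Prop := ∀ (words : List String) (order : String), Dom_isAlienSorted3 words order → Pre_isAlienSorted3 words order → Spec_isAlienSorted3 words order (isAlienSorted3 words order)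

-- ===== LEMMAS AND PROOFS =====

-- Proof-side recursive forms of the pair predicates (structural on the two words).
def pvPairAcceptRec (order : List Char) : List Char → List Char → Bool
  | [], _ => true
  | _ :: _, [] => false
  | c :: ps, c' :: ls =>
    if c = c' then pvPairAcceptRec order ps ls
    else
      match pvLastIdx c order, pvLastIdx c' order with
      | some i, some j => decide (i ≤ j)
      | _, _ => false

def pvPairRaiseRec (order : List Char) : List Char → List Char → Bool
  | c :: ps, c' :: ls =>
    if c = c' then pvPairRaiseRec order ps ls
    else (pvLastIdx c order).isNone || (pvLastIdx c' order).isNone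
  | _, _ => false

theorem firstDiff_cons (c c' : Char) (ps ls : List Char) :
    pvFirstDiff (c :: ps) (c' :: ls) = if c = c' then pvFirstDiff ps ls else some (c, c') := by
  by_cases h : c = c' <;> simp [pvFirstDiff, h]

theorem accept_eq_rec (order : List Char) :
    ∀ (p l : List Char), pvPairAccept order p l = pvPairAcceptRec order p l := by
  intro p
  induction p with
  | nil => intro l; simp [pvPairAccept, pvPairAcceptRec, pvFirstDiff]
  | cons c ps ih =>
    intro l
    cases l with
    | nil => simp [pvPairAccept, pvPairAcceptRec, pvFirstDiff]
    | cons c' ls =>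
      by_cases h : c = c'
      · have hih := ih ls
        simp only [pvPairAccept, firstDiff_cons, if_pos h, pvPairAcceptRec,
          List.length_cons, Nat.add_le_add_iff_right] at hih ⊢
        exact hih
      · simp only [pvPairAccept, firstDiff_cons, if_neg h, pvPairAcceptRec]

theorem raise_eq_rec (order : List Char) :
    ∀ (p l : List Char), pvPairRaise order p l = pvPairRaiseRec order p l := by
  intro p
  induction p with
  | nil => intro l; cases l <;> simp [pvPairRaise, pvPairRaiseRec, pvFirstDiff]
  | cons c ps ih =>
    intro l
    cases l with
    | nil => simp [pvPairRaise, pvPairRaiseRec, pvFirstDiff]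
    | cons c' ls =>
      by_cases h : c = c'
      · have hih := ih ls
        simp only [pvPairRaise, firstDiff_cons, if_pos h, pvPairRaiseRec] at hih ⊢
        exact hih
      · simp only [pvPairRaise, firstDiff_cons, if_neg h, pvPairRaiseRec]

-- The dict built by the comprehension maps each char to its last occurrence index.
theorem build_get? (l : List Char) :
    ∀ (s : Int) (d : PySem.Dict Char Int) (c : Char),
      ((PySem.List.enumerate l s).foldl (fun d p => d.insert p.2 p.1) d).get? c
        = match pvLastIdx c l with
          | some i => some (s + (i : Int))
          | none => d.get? c := by
  induction l with
  | nil => intro s d c; simp [PySem.List.enumerate_nil, pvLastIdx]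
  | cons x xs ih =>
    intro s d c
    have hstep : (PySem.List.enumerate (x :: xs) s).foldl (fun d p => d.insert p.2 p.1) d
        = (PySem.List.enumerate xs (s + 1)).foldl (fun d p => d.insert p.2 p.1) (d.insert x s) := by
      simp [PySem.List.enumerate_cons]
    rw [hstep, ih]
    cases hxs : pvLastIdx c xs with
    | some i =>
      simp only [pvLastIdx, hxs]
      congr 1; push_cast; ring
    | none =>
      simp only [pvLastIdx, hxs, PySem.Dict.get?_insert]
      by_cases hc : c = x
      · subst hc; simp
      · rw [if_neg hc, if_neg (fun h => hc h.symm)]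

theorem buildOrder_get? (order : List Char) (c : Char) :
    (pvBuildOrder order).get? c = (pvLastIdx c order).map (fun i => (i : Int)) := by
  have := build_get? order 0 PySem.Dict.empty c
  unfold pvBuildOrder
  rw [this]
  cases h : pvLastIdx c order <;> simp [PySem.Dict.get?_empty]

theorem pvLastIdx_get : ∀ (l : List Char) (c : Char) (i : Nat),
    pvLastIdx c l = some i → l[i]? = some c := by
  intro l
  induction l with
  | nil => intro c i h; simp [pvLastIdx] at h
  | cons x xs ih =>
    intro c i h
    simp only [pvLastIdx] at h
    cases hxs : pvLastIdx c xs with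
    | some j =>
      rw [hxs] at h; injection h with h; subst h
      simpa using ih c j hxs
    | none =>
      rw [hxs] at h
      split_ifs at h with hx
      · injection h with h; subst h; simpa using hx

theorem pvLastIdx_inj {l : List Char} {c c' : Char} {i : Nat}
    (h : pvLastIdx c l = some i) (h' : pvLastIdx c' l = some i) : c = c' := by
  have h1 := pvLastIdx_get l c i h
  have h2 := pvLastIdx_get l c' i h'
  exact Option.some.inj (h1.symm.trans h2)

-- An accepted pair: A's inner loop returns true, and so does B's key comparison.
theorem accept_true (order : List Char) :
    ∀ (p l : List Char), pvPairAcceptRec order p l = true →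
      pvAInner (pvBuildOrder order) p l = true ∧
      pvLexLe (p.map (fun c => (pvBuildOrder order).getD c (-1)))
              (l.map (fun c => (pvBuildOrder order).getD c (-1))) = true := by
  intro p
  induction p with
  | nil => intro l _; exact ⟨rfl, by cases l <;> simp [pvLexLe]⟩
  | cons c ps ih =>
    intro l hacc
    cases l with
    | nil => simp [pvPairAcceptRec] at hacc
    | cons cn ls =>
      simp only [pvPairAcceptRec] at hacc
      by_cases hcc : c = cn
      · subst hcc
        rw [if_pos rfl] at hacc
        obtain ⟨h1, h2⟩ := ih ls hacc
        refine ⟨by simpa [pvAInner] using h1, ?_⟩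
        simp only [List.map_cons, pvLexLe, lt_irrefl, if_false]
        exact h2
      · rw [if_neg hcc] at hacc
        cases hi : pvLastIdx c order with
        | none => rw [hi] at hacc; simp at hacc
        | some i =>
          cases hj : pvLastIdx cn order with
          | none => rw [hi, hj] at hacc; simp at hacc
          | some j =>
            rw [hi, hj] at hacc
            have hij : i ≤ j := by simpa using hacc
            have hne : i ≠ j := fun h => hcc (pvLastIdx_inj hi (h ▸ hj))
            have hgi : (pvBuildOrder order).get? c = some (i : Int) := by
              rw [buildOrder_get?, hi]; rfl
            have hgj : (pvBuildOrder order).get? cn = some (j : Int) := by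
              rw [buildOrder_get?, hj]; rfl
            constructor
            · simp only [pvAInner, if_pos (fun h : cn = c => hcc h.symm),
                PySem.Dict.getD_of_get?_eq_some _ 0 hgi, PySem.Dict.getD_of_get?_eq_some _ 0 hgj]
              simp only [Bool.not_eq_eq_eq_not, Bool.not_true, decide_eq_false_iff_not, not_lt]
              exact_mod_cast hij
            · simp only [List.map_cons, pvLexLe,
                PySem.Dict.getD_of_get?_eq_some _ (-1) hgi, PySem.Dict.getD_of_get?_eq_some _ (-1) hgj]
              rw [if_pos (by exact_mod_cast lt_of_le_of_ne hij hne)]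

-- A rejected, non-raising pair: A's inner loop returns false, and so does B's comparison.
theorem reject_false (order : List Char) :
    ∀ (p l : List Char), pvPairAcceptRec order p l = false → pvPairRaiseRec order p l = false →
      pvAInner (pvBuildOrder order) p l = false ∧
      pvLexLe (p.map (fun c => (pvBuildOrder order).getD c (-1)))
              (l.map (fun c => (pvBuildOrder order).getD c (-1))) = false := by
  intro p
  induction p with
  | nil => intro l hacc _; simp [pvPairAcceptRec] at hacc
  | cons c ps ih =>
    intro l hacc hr
    cases l with
    | nil => exact ⟨rfl, rfl⟩
    | cons cn ls =>
      simp only [pvPairAcceptRec] at hacc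
      simp only [pvPairRaiseRec] at hr
      by_cases hcc : c = cn
      · subst hcc
        rw [if_pos rfl] at hacc hr
        obtain ⟨h1, h2⟩ := ih ls hacc hr
        refine ⟨by simpa [pvAInner] using h1, ?_⟩
        simp only [List.map_cons, pvLexLe, lt_irrefl, if_false]
        exact h2
      · rw [if_neg hcc] at hacc hr
        cases hi : pvLastIdx c order with
        | none => rw [hi] at hr; simp at hr
        | some i =>
          cases hj : pvLastIdx cn order with
          | none => rw [hi, hj] at hr; simp at hr
          | some j =>
            rw [hi, hj] at hacc
            have hij : ¬ i ≤ j := by simpa using hacc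
            have hgi : (pvBuildOrder order).get? c = some (i : Int) := by
              rw [buildOrder_get?, hi]; rfl
            have hgj : (pvBuildOrder order).get? cn = some (j : Int) := by
              rw [buildOrder_get?, hj]; rfl
            have hji : (j : Int) < (i : Int) := by exact_mod_cast Nat.lt_of_not_le hij
            constructor
            · simp only [pvAInner, if_pos (fun h : cn = c => hcc h.symm),
                PySem.Dict.getD_of_get?_eq_some _ 0 hgi, PySem.Dict.getD_of_get?_eq_some _ 0 hgj]
              simp [hji]
            · simp only [List.map_cons, pvLexLe,
                PySem.Dict.getD_of_get?_eq_some _ (-1) hgi, PySem.Dict.getD_of_get?_eq_some _ (-1) hgj]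
              rw [if_neg (not_lt.mpr (le_of_lt hji)), if_pos hji]

-- ===== VERDICT (by name: the statement is the Claim_ definition above) =====
theorem isAlienSorted3_spec : Claim_equal_isAlienSorted3 := by
  unfold Claim_equal_isAlienSorted3
  intro words order _ hpre
  unfold Pre_isAlienSorted3 at hpre
  unfold Spec_isAlienSorted3
  by_cases hg : words = [] ∨ words.length = 1
  · simp only [isAlienSorted3, isAlienSorted3_alt, if_pos hg]
  · simp only [isAlienSorted3, isAlienSorted3_alt, if_neg hg]
    have eB : pvBuildOrderB order.toList = pvBuildOrder order.toList := rfl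
    rw [eB]
    have main : ∀ ws : List (List Char),
        (∀ k < (ws.zip (ws.drop 1)).length,
          (((ws.zip (ws.drop 1)).take k).all (fun p => pvPairAccept order.toList p.1 p.2)) = true →
          (pvPairRaise order.toList ((ws.zip (ws.drop 1)).getD k ([], [])).1
            ((ws.zip (ws.drop 1)).getD k ([], [])).2) = false) →
        pvAOuter (pvBuildOrder order.toList) ws
          = (((ws.map (fun a => a.map (fun c => (pvBuildOrder order.toList).getD c (-1)))).zip
              ((ws.map (fun a => a.map (fun c => (pvBuildOrder order.toList).getD c (-1)))).drop 1)).all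
              (fun p => pvLexLe p.1 p.2)) := by
      intro ws
      induction ws with
      | nil => intro _; simp [pvAOuter]
      | cons a rest ih =>
        intro hws
        cases rest with
        | nil => simp [pvAOuter]
        | cons b rest' =>
          simp only [List.drop_succ_cons, List.drop_zero, List.zip_cons_cons] at hws
          simp only [pvAOuter, List.map_cons, List.drop_succ_cons, List.drop_zero,
            List.zip_cons_cons, List.all_cons]
          by_cases hacc : pvPairAcceptRec order.toList a b = true
          · obtain ⟨h1, h2⟩ := accept_true order.toList a b hacc
            rw [if_pos h1, h2, Bool.true_and]
            have htail : ∀ k < (((b :: rest').zip ((b :: rest').drop 1)).length),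
                ((((b :: rest').zip ((b :: rest').drop 1)).take k).all
                  (fun p => pvPairAccept order.toList p.1 p.2)) = true →
                (pvPairRaise order.toList (((b :: rest').zip ((b :: rest').drop 1)).getD k ([], [])).1
                  (((b :: rest').zip ((b :: rest').drop 1)).getD k ([], [])).2) = false := by
              intro k hk hall
              have := hws (k + 1) (by simpa using Nat.succ_lt_succ hk)
              simp only [List.take_succ_cons, List.all_cons, List.getD_cons_succ] at this
              apply this
              rw [accept_eq_rec order.toList a b, hacc, Bool.true_and]
              simpa using hall
            have := ih htail
            simpa using this
          · have hacc' : pvPairAcceptRec order.toList a b = false := by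
              simpa using hacc
            have hr0 := hws 0 (by simp)
            simp only [List.take_zero, List.all_nil, List.getD_cons_zero] at hr0
            have hr : pvPairRaiseRec order.toList a b = false := by
              rw [← raise_eq_rec]
              exact hr0 (by simp)
            obtain ⟨h1, h2⟩ := reject_false order.toList a b hacc' hr
            rw [if_neg (by simp [h1]), h2, Bool.false_and]
    have := main (words.map String.toList) hpre
    simpa [List.map_map, Function.comp] using this
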